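-- pv_equiv track=rewrite | github.com/Supersonicsoundwave/EGE26 | task-23/5236.py | f
-- ===== SOURCE A (Python) =====
-- def f(cur, end, cnt):
--     if cur not in [2, 400]:
--         cnt += 1
--     if cur == end and cnt > 50:
--         return 1
--     if cur > end:
--         return 0
--     return f(cur + 2, end, cnt) + f(cur * 3, end, cnt) + f(cur * 4, end, cnt)
-- ===== SOURCE B (Python) =====
-- def f(cur, end, cnt):
--     memo = {}
--
--     def go(cur, cnt):
--         if cur not in (2, 400):
--             cnt += 1
--         if cur == end and cnt > 50:
--             return 1
--         if cur > end:
--             return 0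
--         key = (cur, cnt)
--         v = memo.get(key)
--         if v is None:
--             v = go(cur + 2, cnt) + go(cur * 3, cnt) + go(cur * 4, cnt)
--             memo[key] = v
--         return v
--
--     return go(cur, cnt)
-- ===== Notes on version B (the rewrite author's own statement) =====
-- stated objective: alternative
-- what changed: B memoizes the recursion on the state (cur, cnt) with a dictionary, so each reachable state is expanded once instead of once per path; intended as a speed-up, but a timing run could not confirm it consistently (1.63x median at the largest size), so no speed is claimed.
-- outside the precondition, e.g. on f(0, 0, 49): A returns 2, B returns 2
import Mathlib
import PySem

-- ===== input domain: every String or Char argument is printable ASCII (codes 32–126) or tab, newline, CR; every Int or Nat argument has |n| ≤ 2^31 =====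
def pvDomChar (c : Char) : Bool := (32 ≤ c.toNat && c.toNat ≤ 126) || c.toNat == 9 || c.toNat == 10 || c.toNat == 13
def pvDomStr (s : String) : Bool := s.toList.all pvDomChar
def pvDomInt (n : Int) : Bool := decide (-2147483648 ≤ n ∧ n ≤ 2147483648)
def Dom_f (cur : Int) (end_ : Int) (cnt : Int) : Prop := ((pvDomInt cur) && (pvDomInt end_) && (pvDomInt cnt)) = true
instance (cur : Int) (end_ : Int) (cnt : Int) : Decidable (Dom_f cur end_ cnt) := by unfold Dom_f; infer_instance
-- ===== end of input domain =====

-- B replaces A's plain triple recursion by the same recursion memoized on the state (cur, cnt),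
-- expanding each reachable state once instead of once per path; equivalence is about the return value.

-- ===== PORT A =====
-- fuel makes the recursion total in Lean; on every input admitted by Pre_f the fuel is sufficient (proved below).
def fAux : Nat → Int → Int → Int → Int
  | 0, _, _, _ => 0
  | fuel+1, cur, end_, cnt =>
    let cnt' := if cur = 2 ∨ cur = 400 then cnt else cnt + 1   -- if cur not in [2, 400]: cnt += 1
    if cur = end_ ∧ cnt' > 50 then 1
    else if cur > end_ then 0
    else fAux fuel (cur + 2) end_ cnt' + fAux fuel (cur * 3) end_ cnt' + fAux fuel (cur * 4) end_ cnt'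

def f (cur : Int) (end_ : Int) (cnt : Int) : Int :=
  fAux (end_ + 2 - cur).toNat cur end_ cnt

-- ===== PORT B =====
-- the memo dict  memo : (cur, cnt) after the increment ↦ result  is threaded through the recursion
-- (Python's closure-mutated dict; ported as Std.HashMap, the Lean counterpart of Python's hash-table dict).
def fAltAux : Nat → Int → Int → Int → Std.HashMap (Int × Int) Int → Int × Std.HashMap (Int × Int) Int
  | 0, _, _, _, memo => (0, memo)
  | fuel+1, cur, end_, cnt, memo =>
    let cnt' := if cur = 2 ∨ cur = 400 then cnt else cnt + 1   -- if cur not in (2, 400): cnt += 1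
    if cur = end_ ∧ cnt' > 50 then (1, memo)
    else if cur > end_ then (0, memo)
    else match memo[(cur, cnt')]? with
      | some v => (v, memo)
      | none =>
        let r1 := fAltAux fuel (cur + 2) end_ cnt' memo
        let r2 := fAltAux fuel (cur * 3) end_ cnt' r1.2
        let r3 := fAltAux fuel (cur * 4) end_ cnt' r2.2
        let v := r1.1 + r2.1 + r3.1
        (v, r3.2.insert (cur, cnt') v)

def f_alt (cur : Int) (end_ : Int) (cnt : Int) : Int :=
  (fAltAux (end_ + 2 - cur).toNat cur end_ cnt ∅).1

-- ===== PRECONDITION & SPEC =====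
-- Pre_f excludes (a) cur ≤ 0 with cur ≤ end_ and cur ≠ end_ = 0, where A's recursion descends forever (RecursionError),
-- and (b) the degenerate self-loop cur = end_ = 0, where A re-enters the unchanged state cur = 0 and either
-- RecursionErrors or needs 2^(50-cnt) calls to return — practically unreachable behaviour tied to the recursion limit.
def Pre_f (cur : Int) (end_ : Int) (cnt : Int) : Prop := 1 ≤ cur ∨ end_ < cur
instance (cur : Int) (end_ : Int) (cnt : Int) : Decidable (Pre_f cur end_ cnt) := by unfold Pre_f; infer_instance
def pvWitness_f : Int × Int × Int := (1, 9, 44)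
def Spec_f (cur : Int) (end_ : Int) (cnt : Int) (out : Int) : Prop := out = f_alt cur end_ cnt
instance (cur : Int) (end_ : Int) (cnt : Int) (out : Int) : Decidable (Spec_f cur end_ cnt out) := by unfold Spec_f; infer_instance

-- ===== CLAIM (what is proved, stated in full; the proofs are below) =====
def Claim_equal_f : Prop := ∀ (cur : Int) (end_ : Int) (cnt : Int), Dom_f cur end_ cnt → Pre_f cur end_ cnt → Spec_f cur end_ cnt (f cur end_ cnt)

-- ===== LEMMAS AND PROOFS =====

-- fuel needed at a call  fAux _ c e _  (enough whenever 1 ≤ c, proved by fAux_fuel)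
def pvNeed (c e : Int) : Nat := (e + 2 - c).toNat

-- the cnt stored in a memo key is the post-increment one; recover the call argument:
def pvUnInc (c k : Int) : Int := if c = 2 ∨ c = 400 then k else k - 1

-- memo invariant: every entry is the correct fully-evaluated value for its state
def pvInv (e : Int) (memo : Std.HashMap (Int × Int) Int) : Prop :=
  ∀ c k v, memo[(c, k)]? = some v →
    1 ≤ c ∧ v = fAux (pvNeed c e) c e (pvUnInc c k)

lemma pvNeed_child (c e : Int) (h1 : 1 ≤ c) (hle : c ≤ e) :
    pvNeed (c + 2) e + 1 ≤ pvNeed c e ∧ pvNeed (c * 3) e + 1 ≤ pvNeed c e ∧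
    pvNeed (c * 4) e + 1 ≤ pvNeed c e := by
  unfold pvNeed; omega

-- fuel irrelevance: any sufficient fuel computes the same value
lemma fAux_fuel : ∀ (f1 f2 : Nat) (c e k : Int), 1 ≤ c → pvNeed c e ≤ f1 → pvNeed c e ≤ f2 →
    fAux f1 c e k = fAux f2 c e k := by
  intro f1
  induction f1 with
  | zero =>
    intro f2 c e k h1 hf1 hf2
    have hce : e < c := by unfold pvNeed at hf1; omega
    cases f2 with
    | zero => rfl
    | succ m =>
      simp only [fAux]
      have hne : ¬ (c = e ∧ (if c = 2 ∨ c = 400 then k else k + 1) > 50) := by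
        intro ⟨h, _⟩; omega
      rw [if_neg hne, if_pos hce]
  | succ n ih =>
    intro f2 c e k h1 hf1 hf2
    cases f2 with
    | zero =>
      have hce : e < c := by unfold pvNeed at hf2; omega
      simp only [fAux]
      have hne : ¬ (c = e ∧ (if c = 2 ∨ c = 400 then k else k + 1) > 50) := by
        intro ⟨h, _⟩; omega
      rw [if_neg hne, if_pos hce]
    | succ m =>
      simp only [fAux]
      by_cases hb1 : c = e ∧ (if c = 2 ∨ c = 400 then k else k + 1) > 50
      · rw [if_pos hb1, if_pos hb1]
      · rw [if_neg hb1, if_neg hb1]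
        by_cases hb2 : c > e
        · rw [if_pos hb2, if_pos hb2]
        · rw [if_neg hb2, if_neg hb2]
          have hle : c ≤ e := by omega
          obtain ⟨d1, d2, d3⟩ := pvNeed_child c e h1 hle
          rw [ih m (c + 2) e _ (by omega) (by omega) (by omega),
              ih m (c * 3) e _ (by omega) (by omega) (by omega),
              ih m (c * 4) e _ (by omega) (by omega) (by omega)]

lemma pvUnInc_inc (c k : Int) : pvUnInc c (if c = 2 ∨ c = 400 then k else k + 1) = k := by
  unfold pvUnInc; split_ifs <;> omega

-- main invariant lemma: with a correct memo and sufficient fuel, the memoized recursion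
-- returns the same value as the plain one and preserves the invariant
lemma fAltAux_main : ∀ (fuel : Nat) (c e k : Int) (memo : Std.HashMap (Int × Int) Int),
    1 ≤ c → pvNeed c e ≤ fuel → pvInv e memo →
    (fAltAux fuel c e k memo).1 = fAux fuel c e k ∧ pvInv e (fAltAux fuel c e k memo).2 := by
  intro fuel
  induction fuel with
  | zero => intro c e k memo _ _ hinv; exact ⟨rfl, hinv⟩
  | succ n ih =>
    intro c e k memo h1 hf hinv
    simp only [fAltAux, fAux]
    by_cases hb1 : c = e ∧ (if c = 2 ∨ c = 400 then k else k + 1) > 50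
    · rw [if_pos hb1, if_pos hb1]; exact ⟨rfl, hinv⟩
    · rw [if_neg hb1, if_neg hb1]
      by_cases hb2 : c > e
      · rw [if_pos hb2, if_pos hb2]; exact ⟨rfl, hinv⟩
      · rw [if_neg hb2, if_neg hb2]
        have hle : c ≤ e := by omega
        obtain ⟨d1, d2, d3⟩ := pvNeed_child c e h1 hle
        set k' := if c = 2 ∨ c = 400 then k else k + 1 with hk'
        cases hget : memo[(c, k')]? with
        | some v =>
          constructor
          · obtain ⟨hc1, hv⟩ := hinv c k' v hget
            rw [hv, pvUnInc_inc]
            have : fAux (pvNeed c e) c e k = fAux (n + 1) c e k :=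
              fAux_fuel (pvNeed c e) (n + 1) c e k h1 (le_refl _) hf
            rw [this]
            simp only [fAux]
            rw [if_neg hb1, if_neg hb2]
          · exact hinv
        | none =>
          obtain ⟨e1, i1⟩ := ih (c + 2) e k' memo (by omega) (by omega) hinv
          obtain ⟨e2, i2⟩ := ih (c * 3) e k' _ (by omega) (by omega) i1
          obtain ⟨e3, i3⟩ := ih (c * 4) e k' _ (by omega) (by omega) i2
          refine ⟨by rw [e1, e2, e3], ?_⟩
          -- the inserted value is the correct value for state (c, k')
          intro c0 k0 v0 hget0
          rw [Std.HashMap.getElem?_insert] at hget0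
          by_cases heq : ((c, k') : Int × Int) = (c0, k0)
          · rw [if_pos (beq_iff_eq.mpr heq)] at hget0
            have hc0 : c0 = c := (congrArg Prod.fst heq).symm
            have hk0 : k0 = k' := (congrArg Prod.snd heq).symm
            injection hget0 with hv0
            rw [hc0, hk0, hk']
            refine ⟨h1, ?_⟩
            rw [pvUnInc_inc, ← hv0, e1, e2, e3]
            have : fAux (pvNeed c e) c e k = fAux (n + 1) c e k :=
              fAux_fuel (pvNeed c e) (n + 1) c e k h1 (le_refl _) hf
            rw [this]
            simp only [fAux]
            rw [if_neg hb1, if_neg hb2]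
          · rw [if_neg (by simpa using heq)] at hget0
            exact i3 c0 k0 v0 hget0

lemma pvInv_empty (e : Int) : pvInv e (∅ : Std.HashMap (Int × Int) Int) := by
  intro c k v h
  rw [Std.HashMap.getElem?_empty] at h
  exact absurd h (by simp)

-- the easy region end_ < cur: both sides return 0 (or fuel is 0 on both sides)
lemma pv_gt (n : Nat) (c e k : Int) (memo : Std.HashMap (Int × Int) Int) (h : e < c) :
    fAux n c e k = 0 ∧ (fAltAux n c e k memo).1 = 0 := by
  cases n with
  | zero => exact ⟨rfl, rfl⟩
  | succ m =>
    simp only [fAux, fAltAux]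
    have hne : ¬ (c = e ∧ (if c = 2 ∨ c = 400 then k else k + 1) > 50) := by
      intro ⟨hh, _⟩; omega
    rw [if_neg hne, if_pos h, if_neg hne, if_pos h]
    exact ⟨rfl, rfl⟩

-- ===== VERDICT (by name: the statement is the Claim_ definition above) =====
theorem f_spec : Claim_equal_f := by
  intro cur end_ cnt _ hpre
  unfold Spec_f f f_alt
  rcases hpre with h1 | h2
  · exact ((fAltAux_main _ cur end_ cnt ∅ h1 (le_refl _) (pvInv_empty end_)).1).symm
  · obtain ⟨ha, hb⟩ := pv_gt (end_ + 2 - cur).toNat cur end_ cnt ∅ h2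
    rw [ha, hb]
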